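-- pv_equiv track=rewrite | github.com/pypi-data/pypi-mirror-401 | packages/py-flare-common/py_flare_common-0.1.7-py3-none-any.whl/py_flare_common/ftso/fast_updates.py | encode_update_array
-- ===== SOURCE A (Python) =====
-- def encode_update_array(deltas: list[int]) -> list[int]:
--     update_array = []
--
--     for number in deltas:
--         if not (0 <= number <= 255):
--             raise ValueError("The number must be between 0 and 255, inclusive.")
--         for shift in range(7, -1, -2):
--             sign_bit = (number >> shift) & 1
--             value_bit = (number >> (shift - 1)) & 1
--             update_array.append(-value_bit if sign_bit == 1 else value_bit)
--
--     return update_array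
-- ===== SOURCE B (Python) =====
-- # Table-driven rewrite: each byte's four signed bit-pairs are precomputed once
-- # via the 2-bit group mapping (0,1,2,3) -> (0,1,0,-1); the inner shift loop of
-- # the original disappears from the per-call path.
-- _PAIR = (0, 1, 0, -1)
-- _ENC = [[_PAIR[(n >> s) & 3] for s in (6, 4, 2, 0)] for n in range(256)]
--
--
-- def encode_update_array(deltas: list[int]) -> list[int]:
--     update_array = []
--     for number in deltas:
--         if not (0 <= number <= 255):
--             raise ValueError("The number must be between 0 and 255, inclusive.")
--         update_array.extend(_ENC[number])
--     return update_array
-- ===== Notes on version B (the rewrite author's own statement) =====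
-- stated objective: alternative
-- what changed: Replaces the per-element inner shift loop with a table of all 256 signed bit-pair quadruples precomputed once at module load from a four-entry two-bit-group mapping; each in-range delta is then encoded by a single table lookup and extend.
import Mathlib
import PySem

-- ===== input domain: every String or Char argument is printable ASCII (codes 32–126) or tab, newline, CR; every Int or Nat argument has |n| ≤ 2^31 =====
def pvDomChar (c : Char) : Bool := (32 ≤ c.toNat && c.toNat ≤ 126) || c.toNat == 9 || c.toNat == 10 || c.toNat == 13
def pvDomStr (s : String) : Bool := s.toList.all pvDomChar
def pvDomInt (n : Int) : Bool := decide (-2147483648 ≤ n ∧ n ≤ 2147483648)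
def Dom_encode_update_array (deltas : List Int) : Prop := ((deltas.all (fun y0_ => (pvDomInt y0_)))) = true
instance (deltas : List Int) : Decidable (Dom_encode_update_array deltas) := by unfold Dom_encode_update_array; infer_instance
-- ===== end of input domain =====

-- B replaces A's per-element shift loop by a 256-entry table of signed bit-pair
-- quadruples precomputed from a four-entry two-bit-group mapping
-- (objective: alternative structure; return value identical on Pre_).

-- ===== PORT A =====
-- inner loop 'for shift in range(7, -1, -2)' — shift takes values 7,5,3,1 (nonneg, so .toNat is exact)
def encode_update_array_aux (acc : List Int) : List Int → List Int
  | [] => acc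
  | number :: rest =>
    if 0 ≤ number ∧ number ≤ 255 then
      encode_update_array_aux
        ((PySem.List.pyRange 7 (-1) (-2)).foldl (fun a shift =>
          let sign_bit := PySem.Int.band (number >>> shift.toNat) 1
          let value_bit := PySem.Int.band (number >>> (shift - 1).toNat) 1
          a ++ [if sign_bit = 1 then -value_bit else value_bit]) acc) rest
    else acc  -- Python raises ValueError here; excluded by Pre_

def encode_update_array (deltas : List Int) : List Int :=
  encode_update_array_aux [] deltas

-- ===== PORT B =====
-- _PAIR = (0, 1, 0, -1)
def pvPair : List Int := [0, 1, 0, -1]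

-- one table row: [_PAIR[(n >> s) & 3] for s in (6, 4, 2, 0)]; the index (n>>s)&3
-- is always in 0..3, so List.getD with default 0 is an exact port of the lookup
def pvEncByte (n : Int) : List Int :=
  [6, 4, 2, 0].map (fun s => pvPair.getD (PySem.Int.band (n >>> s) 3).toNat 0)

-- _ENC = [row(n) for n in range(256)]
def pvENC : List (List Int) := (List.range 256).map (fun n => pvEncByte (Int.ofNat n))

def encode_update_array_alt : List Int → List Int
  | [] => []
  | number :: rest =>
    if 0 ≤ number ∧ number ≤ 255 then
      pvENC.getD number.toNat [] ++ encode_update_array_alt rest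
    else []  -- Python raises ValueError here; excluded by Pre_

-- ===== PRECONDITION & SPEC =====
-- A raises ValueError when some element is outside 0..255; exactly those inputs are excluded.
def Pre_encode_update_array (deltas : List Int) : Prop :=
  ∀ n ∈ deltas, 0 ≤ n ∧ n ≤ 255
instance (deltas : List Int) : Decidable (Pre_encode_update_array deltas) := by
  unfold Pre_encode_update_array; infer_instance

def pvWitness_encode_update_array : List Int := [0, 37, 255]

def Spec_encode_update_array (deltas : List Int) (out : List Int) : Prop := out = encode_update_array_alt deltas
instance (deltas : List Int) (out : List Int) : Decidable (Spec_encode_update_array deltas out) := by unfold Spec_encode_update_array; infer_instance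

-- ===== CLAIM (what is proved, stated in full; the proofs are below) =====
def Claim_equal_encode_update_array : Prop := ∀ (deltas : List Int), Dom_encode_update_array deltas → Pre_encode_update_array deltas → Spec_encode_update_array deltas (encode_update_array deltas)

-- ===== LEMMAS AND PROOFS =====

-- the four values A's inner loop appends for a given byte
def pvQuadA (n : Int) : List Int :=
  [7, 5, 3, 1].map (fun shift =>
    if PySem.Int.band (n >>> shift) 1 = 1
    then -(PySem.Int.band (n >>> (shift - 1)) 1)
    else PySem.Int.band (n >>> (shift - 1)) 1)

lemma pyRange_7 : PySem.List.pyRange 7 (-1) (-2) = [7, 5, 3, 1] := by decide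

set_option maxRecDepth 100000 in
lemma quad_eq_encByte : ∀ k : Nat, k < 256 → pvQuadA ((k : Int)) = pvEncByte ((k : Int)) := by
  decide

lemma ENC_getD (k : Nat) (hk : k < 256) : pvENC.getD k [] = pvEncByte ((k : Int)) := by
  have h : pvENC[k]? = some (pvEncByte ((k : Int))) := by
    simp [pvENC, hk]
  simp [List.getD_eq_getElem?_getD, h]

lemma inner_fold (n : Int) (acc : List Int) :
    (PySem.List.pyRange 7 (-1) (-2)).foldl (fun a shift =>
      let sign_bit := PySem.Int.band (n >>> shift.toNat) 1
      let value_bit := PySem.Int.band (n >>> (shift - 1).toNat) 1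
      a ++ [if sign_bit = 1 then -value_bit else value_bit]) acc
    = acc ++ pvQuadA n := by
  rw [pyRange_7]
  simp only [List.foldl, pvQuadA, List.map]
  norm_num [List.append_assoc]

lemma aux_eq (l : List Int) : ∀ acc : List Int, (∀ n ∈ l, 0 ≤ n ∧ n ≤ 255) →
    encode_update_array_aux acc l = acc ++ encode_update_array_alt l := by
  induction l with
  | nil => intro acc _; simp [encode_update_array_aux, encode_update_array_alt]
  | cons n rest ih =>
    intro acc h
    have hn := h n (List.mem_cons_self ..)
    have hrest : ∀ m ∈ rest, 0 ≤ m ∧ m ≤ 255 := fun m hm => h m (List.mem_cons_of_mem _ hm)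
    have hk : n.toNat < 256 := by omega
    have hcast : ((n.toNat : Int)) = n := Int.toNat_of_nonneg hn.1
    rw [encode_update_array_aux, if_pos hn, inner_fold, ih _ hrest,
      encode_update_array_alt, if_pos hn, ENC_getD n.toNat hk,
      ← quad_eq_encByte n.toNat hk, hcast, List.append_assoc]

-- ===== VERDICT (by name: the statement is the Claim_ definition above) =====
theorem encode_update_array_spec : Claim_equal_encode_update_array := by
  intro deltas _ hpre
  unfold Spec_encode_update_array encode_update_array
  simpa using aux_eq deltas [] hpre
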